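-- pv_equiv track=rewrite | github.com/CompetitiveCodingLeetcode/LeetcodeEasy | Stack/InsertElementAtBottomOfStack.py | insert_at_bottom
-- ===== SOURCE A (Python) =====
-- def insert_at_bottom(stack,num):
--     if len(stack) == 0:
--         stack.append(num)
--     else:
--         x = stack.pop()
--
--         insert_at_bottom(stack,num)
--
--         stack.append(x)
--
--         return stack
-- ===== SOURCE B (Python) =====
-- def insert_at_bottom(stack, num):
--     if len(stack) == 0:
--         stack.append(num)
--     else:
--         temp = []
--         while stack:
--             temp.append(stack.pop())
--         stack.append(num)
--         while temp:
--             stack.append(temp.pop())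
--         return stack
-- ===== Notes on version B (the rewrite author's own statement) =====
-- stated objective: alternative
-- what changed: Replaces A's recursion with an iterative two-phase loop using an explicit auxiliary stack: pop everything into temp, push num, pop temp back; same in-place mutation and return value.
-- outside the precondition, e.g. on insert_at_bottom([], 5): A returns None, B returns None
import Mathlib
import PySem

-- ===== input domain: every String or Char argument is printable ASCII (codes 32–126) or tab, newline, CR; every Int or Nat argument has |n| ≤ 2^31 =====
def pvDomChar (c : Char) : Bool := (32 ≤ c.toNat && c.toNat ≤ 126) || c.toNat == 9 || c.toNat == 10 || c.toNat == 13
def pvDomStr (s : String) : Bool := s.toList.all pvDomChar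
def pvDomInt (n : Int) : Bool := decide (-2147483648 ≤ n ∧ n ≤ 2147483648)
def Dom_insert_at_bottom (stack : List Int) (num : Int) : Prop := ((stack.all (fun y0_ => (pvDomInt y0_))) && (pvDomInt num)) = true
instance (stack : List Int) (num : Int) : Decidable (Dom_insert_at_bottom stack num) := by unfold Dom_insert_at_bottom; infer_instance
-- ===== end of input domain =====

-- B replaces A's recursion with an iterative two-phase auxiliary-stack loop (same cost);
-- both mutate the stack in place identically; equivalence here is about the return value.


-- ===== PORT A =====
-- A: if the stack is empty, append num (and return None — excluded by Pre_);
-- else pop the top x, recurse, push x back, return the stack (top = list end).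
def insert_at_bottom (stack : List Int) (num : Int) : List Int :=
  if stack.length = 0 then
    stack ++ [num]
  else
    let x := stack.getLastD 0          -- x = stack.pop()
    insert_at_bottom stack.dropLast num ++ [x]   -- recurse on the popped stack, then append x
termination_by stack.length
decreasing_by
  simp only [List.length_dropLast]
  omega

-- ===== PORT B =====
-- while loop "pop from the end of src, append to dst"
def pvDrain (src dst : List Int) : List Int :=
  if src.length = 0 then dst
  else pvDrain src.dropLast (dst ++ [src.getLastD 0])
termination_by src.length
decreasing_by
  simp only [List.length_dropLast]
  omega

def insert_at_bottom_alt (stack : List Int) (num : Int) : List Int :=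
  if stack.length = 0 then
    stack ++ [num]                      -- returns None in Python; excluded by Pre_
  else
    let temp := pvDrain stack []        -- while stack: temp.append(stack.pop())
    pvDrain temp [num]                  -- stack.append(num); while temp: stack.append(temp.pop())

-- ===== PRECONDITION & SPEC =====
-- Pre_ excludes the empty stack: there both Pythons return None, not a list.
def Pre_insert_at_bottom (stack : List Int) (num : Int) : Prop := stack ≠ []
instance (stack : List Int) (num : Int) : Decidable (Pre_insert_at_bottom stack num) := by unfold Pre_insert_at_bottom; infer_instance
def pvWitness_insert_at_bottom : List Int × Int := ([1, 2, 3], 7)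

def Spec_insert_at_bottom (stack : List Int) (num : Int) (out : List Int) : Prop := out = insert_at_bottom_alt stack num
instance (stack : List Int) (num : Int) (out : List Int) : Decidable (Spec_insert_at_bottom stack num out) := by unfold Spec_insert_at_bottom; infer_instance

-- ===== CLAIM (what is proved, stated in full; the proofs are below) =====
def Claim_equal_insert_at_bottom : Prop := ∀ (stack : List Int) (num : Int), Dom_insert_at_bottom stack num → Pre_insert_at_bottom stack num → Spec_insert_at_bottom stack num (insert_at_bottom stack num)

-- ===== LEMMAS AND PROOFS =====
theorem pvDrain_eq (src dst : List Int) : pvDrain src dst = dst ++ src.reverse := by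
  induction src using List.reverseRecOn generalizing dst with
  | nil => simp [pvDrain]
  | append_singleton xs x _ih =>
      rw [pvDrain]
      simp [_ih]

theorem insert_at_bottom_eq (stack : List Int) (num : Int) :
    insert_at_bottom stack num = num :: stack := by
  induction stack using List.reverseRecOn with
  | nil => simp [insert_at_bottom]
  | append_singleton xs x ih =>
      rw [insert_at_bottom]
      simp [ih]

theorem insert_at_bottom_alt_eq (stack : List Int) (num : Int) :
    insert_at_bottom_alt stack num = num :: stack := by
  cases stack with
  | nil => simp [insert_at_bottom_alt]
  | cons a t =>
      simp [insert_at_bottom_alt, pvDrain_eq]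

-- ===== VERDICT (by name: the statement is the Claim_ definition above) =====
theorem insert_at_bottom_spec : Claim_equal_insert_at_bottom := by
  intro stack num _ _
  unfold Spec_insert_at_bottom
  rw [insert_at_bottom_eq, insert_at_bottom_alt_eq]
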